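-- pv_equiv track=rewrite | github.com/RelyingEarth87/coding-challenges | MaximumSeating.py | maximumSeating
-- ===== SOURCE A (Python) =====
-- def maximumSeating(row: list[int]) -> int:
--     """Returns the number of available seats in a theater row (new guests must have 2 empty seats between them and previously sat guests)
--
--     Args:
--         row (list[int]): A theater row where empty seats are represented by the number 0 and occupied seats are 1
--
--     Returns:
--         int: The current number of seats available in the row with 2 spaces between them and the nearest seated guest
--     """
--     row_copy = row.copy()
--
--     available = 0
--     for i in range(len(row_copy)):
--         if row_copy[i] == 1:
--             continue
--         else:
--             lst = []
--             for j in range(i-2, i+3):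
--                 if j < 0 or j >= len(row_copy):
--                     pass
--                 else:
--                     lst.append(row_copy[j])
--             if 1 in lst:
--                 continue
--             else:
--                 available += 1
--                 row_copy[i] = 1
--
--     return available
-- ===== SOURCE B (Python) =====
-- def maximumSeating(row: list[int]) -> int:
--     """Returns the number of available seats in a theater row (new guests must have 2 empty seats between them and previously sat guests)"""
--     available = 0
--     g = 3  # capped distance from the last occupied/placed seat (3 = far enough / no seat yet)
--     for i, v in enumerate(row):
--         if v == 1:
--             g = 1
--         elif g >= 3 and 1 not in row[i + 1:i + 3]:
--             available += 1
--             g = 1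
--         else:
--             g = min(g + 1, 3)
--     return available
-- ===== Notes on version B (the rewrite author's own statement) =====
-- stated objective: simpler
-- what changed: A copies the row, rescans a 5-seat window around every seat and mutates the copy to record placements; B is a single pass keeping one capped distance-to-last-occupied counter (plus a 2-seat lookahead slice), with no copy, no mutation and no inner window scan.
import Mathlib
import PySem

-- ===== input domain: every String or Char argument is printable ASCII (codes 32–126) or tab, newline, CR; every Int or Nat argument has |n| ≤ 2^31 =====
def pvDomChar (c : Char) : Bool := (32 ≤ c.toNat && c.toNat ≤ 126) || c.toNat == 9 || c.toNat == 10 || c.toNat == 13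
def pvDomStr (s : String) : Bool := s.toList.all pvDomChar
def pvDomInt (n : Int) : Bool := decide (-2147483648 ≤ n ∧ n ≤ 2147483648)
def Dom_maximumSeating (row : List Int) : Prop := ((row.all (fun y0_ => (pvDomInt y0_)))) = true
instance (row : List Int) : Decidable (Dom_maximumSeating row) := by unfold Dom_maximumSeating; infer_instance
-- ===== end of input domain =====

-- B replaces A's copy-mutate-and-rescan greedy by a single pass with a capped
-- distance-to-last-occupied counter and a 2-seat lookahead: simpler, no mutation, no inner scan.


-- ===== PORT A =====
-- Literal port of A: loop i over range(len(row_copy)); i (and every kept j) is always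
-- a valid index, so the total pyGetD/pySetD forms are exact here.
def maximumSeating (row : List Int) : Int :=
  let rowCopy := row   -- row.copy(); the argument itself is never modified
  (((PySem.List.pyRange 0 (PySem.List.len rowCopy) 1).foldl
    (fun (st : List Int × Int) (i : Int) =>
      let rc := st.1
      if PySem.List.pyGetD rc i 0 = 1 then st
      else
        let lst := (PySem.List.pyRange (i - 2) (i + 3) 1).foldl
          (fun (acc : List Int) (j : Int) =>
            if j < 0 ∨ PySem.List.len rc ≤ j then acc
            else acc ++ [PySem.List.pyGetD rc j 0]) []
        if (1 : Int) ∈ lst then st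
        else (PySem.List.pySetD rc i 1, st.2 + 1))
    (rowCopy, 0)).2)

-- ===== PORT B =====
-- Literal port of B (Source B): one fold over enumerate(row) with state (available, g).
def maximumSeating_alt (row : List Int) : Int :=
  ((PySem.List.enumerate row 0).foldl
    (fun (st : Int × Int) (p : Int × Int) =>
      if p.2 = 1 then (st.1, 1)
      else if 3 ≤ st.2 ∧ ¬ ((1 : Int) ∈ PySem.List.slice row (some (p.1 + 1)) (some (p.1 + 3)))
        then (st.1 + 1, 1)
      else (st.1, min (st.2 + 1) 3))
    (0, 3)).1

-- ===== PRECONDITION & SPEC =====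
def Spec_maximumSeating (row : List Int) (out : Int) : Prop := out = maximumSeating_alt row
instance (row : List Int) (out : Int) : Decidable (Spec_maximumSeating row out) := by unfold Spec_maximumSeating; infer_instance

-- ===== CLAIM (what is proved, stated in full; the proofs are below) =====
def Claim_equal_maximumSeating : Prop := ∀ (row : List Int), Dom_maximumSeating row → Spec_maximumSeating row (maximumSeating row)

-- ===== LEMMAS AND PROOFS =====

def runSeats (b2 b1 : Bool) : List Int → Int
  | [] => 0
  | v :: rest =>
    if v = 1 then runSeats b1 true rest
    else if b2 = false ∧ b1 = false ∧ ¬ ((1 : Int) ∈ rest.take 2) then 1 + runSeats b1 true rest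
    else runSeats b1 false rest

def prev1 (p : List Int) : Bool := p.getLast? == some 1
def prev2 (p : List Int) : Bool := p.dropLast.getLast? == some 1

lemma prev1_append (p : List Int) (w : Int) : prev1 (p ++ [w]) = (w == 1) := by
  simp [prev1]

lemma prev2_append (p : List Int) (w : Int) : prev2 (p ++ [w]) = prev1 p := by
  simp [prev2, prev1, List.dropLast_append_of_ne_nil]

lemma mem_one_drop_two (p : List Int) :
    ((1 : Int) ∈ p.drop (p.length - 2)) ↔ (prev2 p = true ∨ prev1 p = true) := by
  rcases hp : p.reverse with _ | ⟨x, q⟩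
  · have : p = [] := by simpa using congrArg List.reverse hp
    subst this; simp [prev1, prev2]
  · rcases hq : q with _ | ⟨y, r⟩
    · have : p = [x] := by
        have := congrArg List.reverse hp; simpa [hq] using this
      subst this; simp [prev1, prev2]; omega
    · have hpe : p = r.reverse ++ [y, x] := by
        have := congrArg List.reverse hp; simpa [hq] using this
      subst hpe
      have hlen : (r.reverse ++ [y, x]).length - 2 = r.reverse.length := by simp
      rw [hlen, List.drop_append_of_le_length (by simp)]
      have h2 : List.drop r.reverse.length r.reverse = [] := by simp
      rw [h2]
      simp [prev1, prev2, List.dropLast_append_of_ne_nil]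
      omega

lemma pyRange_window (a : Int) : PySem.List.pyRange (a-2) (a+3) 1 = [a-2, a-1, a, a+1, a+2] := by
  have h5 : ((a+3) - (a-2)).toNat = 5 := by omega
  rw [PySem.List.pyRange_one, h5]
  simp [List.range_succ]
  refine ⟨by ring, by ring, by ring⟩

lemma pyGetD_append_add (l1 l2 : List Int) (k : Nat) :
    PySem.List.pyGetD (l1 ++ l2) ((l1.length : Int) + k) 0 = l2.getD k 0 := by
  have h : (l1.length : Int) + k = ((l1.length + k : Nat) : Int) := by push_cast; ring
  rw [h, PySem.List.pyGetD_natCast]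
  simp [List.getD, List.getElem?_append_right]

lemma windowA (p : List Int) (v : Int) (rest : List Int) :
    ((PySem.List.pyRange ((p.length : Int) - 2) ((p.length : Int) + 3) 1).foldl
      (fun (acc : List Int) (j : Int) =>
        if j < 0 ∨ PySem.List.len (p ++ v :: rest) ≤ j then acc
        else acc ++ [PySem.List.pyGetD (p ++ v :: rest) j 0]) [])
    = p.drop (p.length - 2) ++ v :: rest.take 2 := by
  have hn0 : ∀ n : Nat, ¬ ((n:Int) < 0) := fun n => by omega
  have hn1 : ∀ n : Nat, ((0:Int) ≤ (n:Int) + 1) := fun n => by omega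
  have hn2 : ∀ n : Nat, ((0:Int) ≤ (n:Int) + 1 + 1) := fun n => by omega
  have hn3 : ∀ n : Nat, ((2:Int) ≤ (n:Int) + 1 + 1) := fun n => by omega
  have hn4 : ∀ n : Nat, ¬ ((n:Int) + 1 < 0) := fun n => by omega
  have hn5 : ∀ n : Nat, ¬ ((n:Int) + 1 + 1 < 0) := fun n => by omega
  have hn6 : ∀ n : Nat, ¬ ((n:Int) + 1 + 1 + 1 < 0) := fun n => by omega
  have hn7 : ∀ n : Nat, ¬ ((n:Int) + 1 + 1 + 1 < 3) := fun n => by omega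
  have hn8 : ∀ n : Nat, ((0:Int) ≤ (n:Int) + 1 + 1 + 1) := fun n => by omega
  have hn9 : ∀ n : Nat, ((2:Int) ≤ (n:Int) + 1 + 1 + 1) := fun n => by omega
  have hn10 : ∀ n : Nat, ((3:Int) ≤ (n:Int) + 1 + 1 + 1) := fun n => by omega
  rcases hp : p.reverse with _ | ⟨x, q⟩
  · have hpe : p = [] := by simpa using congrArg List.reverse hp
    subst hpe
    have h5 : ((((([]:List Int).length : Int)) + 3) - (((([]:List Int).length : Int)) - 2)).toNat = 5 := by simp
    rw [PySem.List.pyRange_one, h5]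
    rcases rest with _ | ⟨r1, _ | ⟨r2, rr⟩⟩ <;>
      simp [List.range_succ, List.foldl, PySem.List.len_eq, PySem.List.pyGetD,
            PySem.List.pyGet?, PySem.List.pyIdx?, hn0, hn1, hn2, hn3, hn4, hn5]
  · rcases hq : q with _ | ⟨y, r⟩
    · have hpe : p = [x] := by
        have := congrArg List.reverse hp; simpa [hq] using this
      subst hpe
      have h5 : (((([x]:List Int).length : Int) + 3) - ((([x]:List Int).length : Int) - 2)).toNat = 5 := by simp
      rw [PySem.List.pyRange_one, h5]
      rcases rest with _ | ⟨r1, _ | ⟨r2, rr⟩⟩ <;>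
        simp [List.range_succ, List.foldl, PySem.List.len_eq, PySem.List.pyGetD,
              PySem.List.pyGet?, PySem.List.pyIdx?, hn2, hn4, hn5, hn6, hn7, hn8, hn9, hn10]
    · have hpe : p = r.reverse ++ [y, x] := by
        have := congrArg List.reverse hp; simpa [hq] using this
      subst hpe
      rw [pyRange_window]
      have hre : (r.reverse ++ [y, x]) ++ v :: rest = r.reverse ++ (y :: x :: v :: rest) := by simp
      have hlen : (((r.reverse ++ [y, x]).length : Int)) = (r.reverse.length : Int) + 2 := by simp
      have hdrop : List.drop ((r.reverse ++ [y, x]).length - 2) (r.reverse ++ [y, x]) = [y, x] := by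
        rw [show ((r.reverse ++ [y, x]).length - 2) = r.reverse.length from by simp,
            List.drop_append_of_le_length (by simp)]
        simp
      set L := r.reverse with hL
      have g0 : PySem.List.pyGetD (L ++ (y :: x :: v :: rest)) ((L.length:Int) + 2 - 2) 0 = y := by
        rw [show ((L.length:Int) + 2 - 2) = (L.length:Int) + ((0:Nat):Int) from by push_cast; ring,
            pyGetD_append_add]; rfl
      have g1 : PySem.List.pyGetD (L ++ (y :: x :: v :: rest)) ((L.length:Int) + 2 - 1) 0 = x := by
        rw [show ((L.length:Int) + 2 - 1) = (L.length:Int) + ((1:Nat):Int) from by push_cast; ring,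
            pyGetD_append_add]; rfl
      have g2 : PySem.List.pyGetD (L ++ (y :: x :: v :: rest)) ((L.length:Int) + 2) 0 = v := by
        rw [show ((L.length:Int) + 2) = (L.length:Int) + ((2:Nat):Int) from by push_cast; ring,
            pyGetD_append_add]; rfl
      have g3 : PySem.List.pyGetD (L ++ (y :: x :: v :: rest)) ((L.length:Int) + 2 + 1) 0 = rest.getD 0 0 := by
        rw [show ((L.length:Int) + 2 + 1) = (L.length:Int) + ((3:Nat):Int) from by push_cast; ring,
            pyGetD_append_add]; rfl
      have g4 : PySem.List.pyGetD (L ++ (y :: x :: v :: rest)) ((L.length:Int) + 2 + 2) 0 = rest.getD 1 0 := by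
        rw [show ((L.length:Int) + 2 + 2) = (L.length:Int) + ((4:Nat):Int) from by push_cast; ring,
            pyGetD_append_add]; rfl
      simp only [List.foldl, hre, hlen, hdrop, PySem.List.len_eq]
      rcases rest with _ | ⟨r1, _ | ⟨r2, rr⟩⟩
      · have c1 : ¬((L.length:Int) + 2 - 2 < 0 ∨ (((L ++ [y, x, v]).length : Int)) ≤ (L.length:Int) + 2 - 2) := by
          simp only [List.length_append, List.length_cons, List.length_nil]; push_cast; omega
        have c2 : ¬((L.length:Int) + 2 - 1 < 0 ∨ (((L ++ [y, x, v]).length : Int)) ≤ (L.length:Int) + 2 - 1) := by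
          simp only [List.length_append, List.length_cons, List.length_nil]; push_cast; omega
        have c3 : ¬((L.length:Int) + 2 < 0 ∨ (((L ++ [y, x, v]).length : Int)) ≤ (L.length:Int) + 2) := by
          simp only [List.length_append, List.length_cons, List.length_nil]; push_cast; omega
        have c4 : ((L.length:Int) + 2 + 1 < 0 ∨ (((L ++ [y, x, v]).length : Int)) ≤ (L.length:Int) + 2 + 1) := by
          simp only [List.length_append, List.length_cons, List.length_nil]; push_cast; omega
        have c5 : ((L.length:Int) + 2 + 2 < 0 ∨ (((L ++ [y, x, v]).length : Int)) ≤ (L.length:Int) + 2 + 2) := by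
          simp only [List.length_append, List.length_cons, List.length_nil]; push_cast; omega
        rw [if_neg c1, g0, if_neg c2, g1, if_neg c3, g2, if_pos c4, if_pos c5]
        simp
      · have c1 : ¬((L.length:Int) + 2 - 2 < 0 ∨ (((L ++ [y, x, v, r1]).length : Int)) ≤ (L.length:Int) + 2 - 2) := by
          simp only [List.length_append, List.length_cons, List.length_nil]; push_cast; omega
        have c2 : ¬((L.length:Int) + 2 - 1 < 0 ∨ (((L ++ [y, x, v, r1]).length : Int)) ≤ (L.length:Int) + 2 - 1) := by
          simp only [List.length_append, List.length_cons, List.length_nil]; push_cast; omega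
        have c3 : ¬((L.length:Int) + 2 < 0 ∨ (((L ++ [y, x, v, r1]).length : Int)) ≤ (L.length:Int) + 2) := by
          simp only [List.length_append, List.length_cons, List.length_nil]; push_cast; omega
        have c4 : ¬((L.length:Int) + 2 + 1 < 0 ∨ (((L ++ [y, x, v, r1]).length : Int)) ≤ (L.length:Int) + 2 + 1) := by
          simp only [List.length_append, List.length_cons, List.length_nil]; push_cast; omega
        have c5 : ((L.length:Int) + 2 + 2 < 0 ∨ (((L ++ [y, x, v, r1]).length : Int)) ≤ (L.length:Int) + 2 + 2) := by
          simp only [List.length_append, List.length_cons, List.length_nil]; push_cast; omega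
        rw [if_neg c1, g0, if_neg c2, g1, if_neg c3, g2, if_neg c4, g3, if_pos c5]
        simp
      · have c1 : ¬((L.length:Int) + 2 - 2 < 0 ∨ (((L ++ y :: x :: v :: r1 :: r2 :: rr).length : Int)) ≤ (L.length:Int) + 2 - 2) := by
          simp only [List.length_append, List.length_cons]; push_cast; omega
        have c2 : ¬((L.length:Int) + 2 - 1 < 0 ∨ (((L ++ y :: x :: v :: r1 :: r2 :: rr).length : Int)) ≤ (L.length:Int) + 2 - 1) := by
          simp only [List.length_append, List.length_cons]; push_cast; omega
        have c3 : ¬((L.length:Int) + 2 < 0 ∨ (((L ++ y :: x :: v :: r1 :: r2 :: rr).length : Int)) ≤ (L.length:Int) + 2) := by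
          simp only [List.length_append, List.length_cons]; push_cast; omega
        have c4 : ¬((L.length:Int) + 2 + 1 < 0 ∨ (((L ++ y :: x :: v :: r1 :: r2 :: rr).length : Int)) ≤ (L.length:Int) + 2 + 1) := by
          simp only [List.length_append, List.length_cons]; push_cast; omega
        have c5 : ¬((L.length:Int) + 2 + 2 < 0 ∨ (((L ++ y :: x :: v :: r1 :: r2 :: rr).length : Int)) ≤ (L.length:Int) + 2 + 2) := by
          simp only [List.length_append, List.length_cons]; push_cast; omega
        rw [if_neg c1, g0, if_neg c2, g1, if_neg c3, g2, if_neg c4, g3, if_neg c5, g4]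
        simp

-- A's loop over the remaining indices computes runSeats of the remaining suffix.
lemma loopA (t : List Int) : ∀ (p : List Int) (a : Int),
    ((PySem.List.pyRange (p.length : Int) (((p.length + t.length : Nat) : Int)) 1).foldl
      (fun (st : List Int × Int) (i : Int) =>
        if PySem.List.pyGetD st.1 i 0 = 1 then st
        else
          if (1 : Int) ∈ (PySem.List.pyRange (i - 2) (i + 3) 1).foldl
            (fun (acc : List Int) (j : Int) =>
              if j < 0 ∨ PySem.List.len st.1 ≤ j then acc
              else acc ++ [PySem.List.pyGetD st.1 j 0]) [] then st
          else (PySem.List.pySetD st.1 i 1, st.2 + 1))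
      (p ++ t, a)).2 = a + runSeats (prev2 p) (prev1 p) t := by
  induction t with
  | nil =>
    intro p a
    rw [PySem.List.pyRange_one_eq_nil (by simp)]
    simp [runSeats]
  | cons v rest ih =>
    intro p a
    rw [PySem.List.pyRange_one_cons (by simp only [List.length_cons]; push_cast; omega)]
    simp only [List.foldl]
    have hv : PySem.List.pyGetD (p ++ v :: rest) ((p.length : Int)) 0 = v := by
      have h := pyGetD_append_add p (v :: rest) 0
      simpa using h
    have hlen1 : (((p ++ [v]).length : Int)) = (p.length : Int) + 1 := by simp
    have happ : (p ++ [v]) ++ rest = p ++ v :: rest := by simp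
    have hbound : (((p ++ [v]).length + rest.length : Nat) : Int)
        = ((p.length + (v :: rest).length : Nat) : Int) := by push_cast; simp; ring
    by_cases hv1 : v = 1
    · rw [hv, if_pos hv1]
      have h := ih (p ++ [v]) a
      rw [hlen1, hbound, happ] at h
      rw [h, prev1_append, prev2_append]
      simp [runSeats, hv1]
    · rw [hv, if_neg hv1, windowA]
      by_cases hm : (1:Int) ∈ p.drop (p.length - 2) ++ v :: rest.take 2
      · rw [if_pos hm]
        have h := ih (p ++ [v]) a
        rw [hlen1, hbound, happ] at h
        rw [h, prev1_append, prev2_append]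
        have hcases : prev2 p = true ∨ prev1 p = true ∨ (1:Int) ∈ rest.take 2 := by
          rcases List.mem_append.mp hm with h1 | h2
          · rcases (mem_one_drop_two p).mp h1 with h | h
            · exact Or.inl h
            · exact Or.inr (Or.inl h)
          · rcases List.mem_cons.mp h2 with h | h
            · exact absurd h.symm hv1
            · exact Or.inr (Or.inr h)
        have hne : ¬ (prev2 p = false ∧ prev1 p = false ∧ ¬ ((1:Int) ∈ rest.take 2)) := by
          rintro ⟨h2, h1, h3⟩
          rcases hcases with h | h | h
          · rw [h2] at h; exact Bool.false_ne_true h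
          · rw [h1] at h; exact Bool.false_ne_true h
          · exact h3 h
        simp only [runSeats, if_neg hv1, if_neg hne]
        rw [show (v == 1) = false from by simp [hv1]]
      · rw [if_neg hm]
        have hset : PySem.List.pySetD (p ++ v :: rest) ((p.length : Int)) 1 = (p ++ [1]) ++ rest := by
          rw [show ((p.length : Int)) = ((p.length : Nat) : Int) from rfl, PySem.List.pySetD_natCast,
              List.set_append]
          simp
        rw [hset]
        have h := ih (p ++ [1]) (a + 1)
        have hlen1' : (((p ++ [1]).length : Int)) = (p.length : Int) + 1 := by simp
        have hbound' : (((p ++ [1]).length + rest.length : Nat) : Int)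
            = ((p.length + (v :: rest).length : Nat) : Int) := by push_cast; simp; ring
        rw [hlen1', hbound'] at h
        rw [h, prev1_append, prev2_append]
        have hpos : prev2 p = false ∧ prev1 p = false ∧ ¬ ((1:Int) ∈ rest.take 2) := by
          refine ⟨?_, ?_, ?_⟩
          · cases h2 : prev2 p
            · rfl
            · exact absurd (List.mem_append.mpr (Or.inl ((mem_one_drop_two p).mpr (Or.inl h2)))) hm
          · cases h1 : prev1 p
            · rfl
            · exact absurd (List.mem_append.mpr (Or.inl ((mem_one_drop_two p).mpr (Or.inr h1)))) hm
          · intro h3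
            exact hm (List.mem_append.mpr (Or.inr (List.mem_cons.mpr (Or.inr h3))))
        simp only [runSeats, if_neg hv1, if_pos hpos]
        ring_nf
        simp

-- B's fold computes runSeats as well, with g encoding (b2, b1).
lemma loopB(row : List Int) (t : List Int) : ∀ (k : Nat) (a g : Int) (b2 b1 : Bool),
    row.drop k = t →
    ((g = 1 ∧ b1 = true) ∨ (g = 2 ∧ b1 = false ∧ b2 = true) ∨ (g = 3 ∧ b1 = false ∧ b2 = false)) →
    ((PySem.List.enumerate t (k : Int)).foldl
      (fun (st : Int × Int) (p : Int × Int) =>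
        if p.2 = 1 then (st.1, 1)
        else if 3 ≤ st.2 ∧ ¬ ((1 : Int) ∈ PySem.List.slice row (some (p.1 + 1)) (some (p.1 + 3)))
          then (st.1 + 1, 1)
        else (st.1, min (st.2 + 1) 3))
      (a, g)).1 = a + runSeats b2 b1 t := by
  induction t with
  | nil => intro k a g b2 b1 _ _; simp [PySem.List.enumerate, runSeats]
  | cons v rest ih =>
    intro k a g b2 b1 hdrop hrel
    have hdrop' : row.drop (k+1) = rest := by
      have : row.drop (k+1) = (row.drop k).drop 1 := by rw [List.drop_drop]
      rw [this, hdrop]; rfl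
    have hsl : PySem.List.slice row (some ((k:Int)+1)) (some ((k:Int)+3)) = rest.take 2 := by
      rw [show ((k:Int)+1) = (((k+1:Nat)):Int) from by push_cast; ring,
          show ((k:Int)+3) = (((k+3:Nat)):Int) from by push_cast; ring,
          PySem.List.slice_natCast, hdrop']
      congr 1
      omega
    have hcast : ((k:Int)+1) = (((k+1:Nat)):Int) := by push_cast; ring
    rw [PySem.List.enumerate_cons]
    simp only [List.foldl]
    by_cases hv : v = 1
    · rw [if_pos hv]
      rw [hcast]
      rw [ih (k+1) a 1 b1 true hdrop' (Or.inl ⟨rfl, rfl⟩)]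
      simp [runSeats, hv]
    · rw [if_neg hv]
      rcases hrel with ⟨hg, hb1⟩ | ⟨hg, hb1, hb2⟩ | ⟨hg, hb1, hb2⟩
      · rw [if_neg (by rw [hg]; intro h; exact absurd h.1 (by norm_num))]
        rw [hg, show min ((1:Int)+1) 3 = 2 from by norm_num, hcast]
        rw [ih (k+1) a 2 b1 false hdrop' (Or.inr (Or.inl ⟨rfl, rfl, hb1⟩))]
        simp [runSeats, hv, hb1]
      · rw [if_neg (by rw [hg]; intro h; exact absurd h.1 (by norm_num))]
        rw [hg, show min ((2:Int)+1) 3 = 3 from by norm_num, hcast]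
        rw [ih (k+1) a 3 b1 false hdrop' (Or.inr (Or.inr ⟨rfl, rfl, hb1⟩))]
        simp [runSeats, hv, hb1, hb2]
      · by_cases hm : (1:Int) ∈ rest.take 2
        · rw [if_neg (by rw [hsl]; intro h; exact h.2 hm)]
          rw [hg, show min ((3:Int)+1) 3 = 3 from by norm_num, hcast]
          rw [ih (k+1) a 3 b1 false hdrop' (Or.inr (Or.inr ⟨rfl, rfl, hb1⟩))]
          simp [runSeats, hv, hb1, hb2, hm]
        · rw [if_pos (by rw [hsl, hg]; exact ⟨by norm_num, hm⟩)]
          rw [hcast]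
          rw [ih (k+1) (a+1) 1 b1 true hdrop' (Or.inl ⟨rfl, rfl⟩)]
          simp [runSeats, hv, hb1, hb2, hm]
          ring

-- ===== VERDICT (by name: the statement is the Claim_ definition above) =====
theorem maximumSeating_spec : Claim_equal_maximumSeating := by
  intro row _
  show maximumSeating row = maximumSeating_alt row
  have hA := loopA row [] 0
  have hB := loopB row row 0 0 3 false false (by simp) (by simp)
  simp only [List.nil_append, List.length_nil, Nat.zero_add, Nat.cast_zero] at hA
  simp [maximumSeating, maximumSeating_alt, PySem.List.len_eq, prev1, prev2] at hA hB ⊢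
  rw [hA, hB]
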